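-- pv_equiv track=rewrite | github.com/Coboviz/A-level-Python-Problems | RecursionPractice/5.py | addZero
-- ===== SOURCE A (Python) =====
-- def addZero(number, index, result):
--     s = str(number)
--     if index == len(s):
--         return result
--     if int(s[index]) % 2 == 1:
--         result = result + s[index] + "0"
--         return addZero(number, index + 1, result)
--     else:
--         result = result + s[index]
--         return addZero(number, index + 1, result)
-- ===== SOURCE B (Python) =====
-- def addZero(number, index, result):
--     s = str(number)
--     while index != len(s):
--         d = s[index]
--         result += d + ("0" if int(d) % 2 == 1 else "")
--         index += 1
--     return result
-- ===== Notes on version B (the rewrite author's own statement) =====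
-- stated objective: idiomatic
-- what changed: Replaced the three-argument tail recursion with a single while loop over the digit string that appends d plus a conditional '0' suffix in one concatenation.
import Mathlib
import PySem

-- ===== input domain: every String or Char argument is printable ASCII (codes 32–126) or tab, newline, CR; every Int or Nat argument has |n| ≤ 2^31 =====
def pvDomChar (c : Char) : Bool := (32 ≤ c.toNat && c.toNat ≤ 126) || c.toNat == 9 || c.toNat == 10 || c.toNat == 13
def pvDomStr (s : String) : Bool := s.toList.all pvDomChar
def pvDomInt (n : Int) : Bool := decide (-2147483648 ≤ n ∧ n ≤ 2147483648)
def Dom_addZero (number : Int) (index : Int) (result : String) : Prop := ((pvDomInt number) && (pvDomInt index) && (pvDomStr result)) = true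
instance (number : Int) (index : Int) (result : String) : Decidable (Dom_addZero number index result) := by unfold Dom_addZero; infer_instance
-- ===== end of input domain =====

-- B rewrites A's three-argument tail recursion as a plain while loop appending a conditional '0' suffix; objective: idiomatic (same cost).

-- ===== PORT A =====
-- literal port of A's recursion: re-reads str(number) on every call, two recursive calls.
def addZero (number : Int) (index : Int) (result : String) : String :=
  -- s = str(number), inlined
  if index = ((PySem.Int.toChars number).length : Int) then result
  else
    match _h : PySem.List.pyGet? (PySem.Int.toChars number) index with
    | none => result          -- Python: IndexError (excluded by Pre_)
    | some c =>
      match PySem.Int.ofChars? [c] with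
      | none => result        -- Python: ValueError on '-' (excluded by Pre_)
      | some d =>
        if PySem.Int.mod d 2 = 1 then
          addZero number (index + 1) (result ++ String.ofList [c] ++ "0")
        else
          addZero number (index + 1) (result ++ String.ofList [c])
termination_by (((PySem.Int.toChars number).length : Int) - index).toNat
decreasing_by
  all_goals
    have hr : PySem.Raise.InRange (PySem.Int.toChars number).length index := by
      by_contra hn
      rw [← PySem.List.pyGet?_eq_none_iff (xs := PySem.Int.toChars number)] at hn
      simp_all
    unfold PySem.Raise.InRange at hr
    omega

-- ===== PORT B =====
-- the while loop of Source B: state (index, result), s fixed; one concatenation per digit.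
def addZeroLoop (s : List Char) (index : Int) (result : String) : String :=
  if index = (s.length : Int) then result
  else
    match _h : PySem.List.pyGet? s index with
    | none => result          -- Python: IndexError (excluded by Pre_)
    | some d =>
      match PySem.Int.ofChars? [d] with
      | none => result        -- Python: ValueError on '-' (excluded by Pre_)
      | some v =>
        addZeroLoop s (index + 1)
          (result ++ (String.ofList [d] ++ (if PySem.Int.mod v 2 = 1 then "0" else "")))
termination_by ((s.length : Int) - index).toNat
decreasing_by
  have hr : PySem.Raise.InRange s.length index := by
    by_contra hn
    rw [← PySem.List.pyGet?_eq_none_iff (xs := s)] at hn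
    simp_all
  unfold PySem.Raise.InRange at hr
  omega

def addZero_alt (number : Int) (index : Int) (_result : String) : String :=
  let s := PySem.Int.toChars number
  addZeroLoop s index _result

-- ===== PRECONDITION & SPEC =====
-- Pre_ excludes exactly the inputs where the Python raises: index outside [-len(s), len(s)]
-- (IndexError) and a visited '-' sign, i.e. number < 0 with index ≤ 0 (ValueError).
def Pre_addZero (number : Int) (index : Int) (result : String) : Prop :=
  let s := PySem.Int.toChars number
  (-(s.length : Int) ≤ index ∧ index ≤ (s.length : Int)) ∧ (0 ≤ number ∨ 1 ≤ index)
instance (number : Int) (index : Int) (result : String) : Decidable (Pre_addZero number index result) := by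
  unfold Pre_addZero; infer_instance
def pvWitness_addZero : Int × Int × String := (123, 0, "")

def Spec_addZero (number : Int) (index : Int) (result : String) (out : String) : Prop := out = addZero_alt number index result
instance (number : Int) (index : Int) (result : String) (out : String) : Decidable (Spec_addZero number index result out) := by unfold Spec_addZero; infer_instance

-- ===== CLAIM (what is proved, stated in full; the proofs are below) =====
def Claim_equal_addZero : Prop := ∀ (number : Int) (index : Int) (result : String), Dom_addZero number index result → Pre_addZero number index result → Spec_addZero number index result (addZero number index result)

-- ===== LEMMAS AND PROOFS =====

theorem addZero_eq_loop (number : Int) :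
    ∀ (index : Int) (result : String),
      addZero number index result = addZeroLoop (PySem.Int.toChars number) index result := by
  intro index result
  fun_induction addZero number index result
  all_goals rw [addZeroLoop]
  all_goals repeat' split
  all_goals try simp_all [String.append_assoc]
  all_goals omega

-- ===== VERDICT (by name: the statement is the Claim_ definition above) =====
theorem addZero_spec : Claim_equal_addZero := by
  intro number index result _ _
  unfold Spec_addZero addZero_alt
  exact addZero_eq_loop number index result
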